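-- pv_equiv track=rewrite | github.com/fnareoh/DTW | dynamic_programming.py | homoedit_to_empty
-- ===== SOURCE A (Python) =====
-- def homoedit_to_empty(x):
--     """Homo-edt distance from a string
--     to an empty string"""
--
--     n = len(x)
--     H = [[0 for i in range(n)] for j in range(n)]
--     for i in range(n):
--         H[i][i] = 1
--     for j in range(2, n + 1):
--         for i in range(n - j + 1):
--             C = [
--                 (H[i][k] + H[k + 1][i + j - 1] - int(x[i] == x[i + j - 1]))
--                 for k in range(i, i + j - 1)
--             ]
--             H[i][i + j - 1] = min(C)
--     return H
-- ===== SOURCE B (Python) =====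
-- def homoedit_to_empty(x):
--     n = len(x)
--     H = [[0] * n for _ in range(n)]
--
--     def solve(i, j):
--         if i == j:
--             H[i][j] = 1
--             return 1
--         best = None
--         for k in range(i, j):
--             a = H[i][k] or solve(i, k)
--             b = H[k + 1][j] or solve(k + 1, j)
--             s = a + b
--             if best is None or s < best:
--                 best = s
--         v = best - (x[i] == x[j])
--         H[i][j] = v
--         return v
--
--     if n:
--         solve(0, n - 1)
--     return H
-- ===== Notes on version B (the rewrite author's own statement) =====
-- stated objective: alternative
-- what changed: Replaces A's iterative diagonal-by-diagonal fill (which builds a candidate list and calls min for every cell) with a top-down recursive solve(i,j) that computes cells on demand, using the zero-initialized table itself as the memo (a zero entry means not yet computed) and a running minimum instead of a materialized candidate list.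
import Mathlib
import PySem

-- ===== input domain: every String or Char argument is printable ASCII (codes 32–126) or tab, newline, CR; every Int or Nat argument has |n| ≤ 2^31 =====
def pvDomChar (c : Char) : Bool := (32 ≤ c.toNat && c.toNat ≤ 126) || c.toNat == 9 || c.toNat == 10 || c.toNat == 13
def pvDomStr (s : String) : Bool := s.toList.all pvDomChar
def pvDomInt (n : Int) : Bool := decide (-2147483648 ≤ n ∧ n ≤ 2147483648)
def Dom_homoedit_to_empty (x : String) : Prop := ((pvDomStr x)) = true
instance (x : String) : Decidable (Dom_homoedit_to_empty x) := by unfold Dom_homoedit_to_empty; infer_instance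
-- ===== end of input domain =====

-- B replaces A's iterative diagonal-by-diagonal fill of a preallocated square table with a
-- top-down recursive solver that computes cells on demand, using the zero table itself as
-- the memo and a running minimum (objective: alternative decomposition, same O(n^3) work).

-- Python's builtin min(l) on a nonempty list (both sources call it)
def pvMin (l : List Int) : Int := (PySem.List.min? l (fun y => y)).getD 0

-- int(x[i] == x[j]) for in-range i, j
def pvEq (c : List Char) (i j : Nat) : Int := if c.getD i ' ' = c.getD j ' ' then 1 else 0

-- ===== PORT A =====
-- body of A's inner loop over i at substring length j: build C, set H[i][i+j-1] = min(C)
def aInnerStep (c : List Char) (j : Nat) (H : List (List Int)) (i : Nat) : List (List Int) :=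
  H.set i ((H.getD i []).set (i + j - 1)
    (pvMin ((List.range (j - 1)).map (fun d =>
      (H.getD i []).getD (i + d) 0 + (H.getD (i + d + 1) []).getD (i + j - 1) 0 -
        pvEq c i (i + j - 1)))))

def homoedit_to_empty (x : String) : List (List Int) :=
  let c := x.toList
  let n := c.length
  let H0 := (List.range n).map (fun _ => (List.range n).map (fun _ => (0 : Int)))
  let H1 := (List.range n).foldl (fun H i => H.set i ((H.getD i []).set i (1 : Int))) H0
  (List.range (n - 1)).foldl (fun H t => (List.range (n - (t + 2) + 1)).foldl (aInnerStep c (t + 2)) H) H1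

-- ===== PORT B =====
-- getE / setE: reading and writing one cell of the list-of-rows table H
def getE (H : List (List Int)) (a b : Nat) : Int := (H.getD a []).getD b 0

def setE (H : List (List Int)) (a b : Nat) (v : Int) : List (List Int) :=
  H.set a ((H.getD a []).set b v)

-- solve(i, j), threading the table H (Python mutates it in place); `getE ... ≠ 0` is
-- Python's truthiness check `H[i][k] or solve(i, k)` (a computed cell is never 0), and the
-- Option accumulator is Python's `best = None` running minimum
def bSolve (c : List Char) (fuel : Nat) (i j : Nat) (H : List (List Int)) :
    List (List Int) × Int :=
  match fuel with
  | 0 => (H, 0)  -- fuel guard only; alt calls with fuel > j - i, so this arm is never reached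
  | fuel + 1 =>
    if j ≤ i then
      -- Python's `i == j` base case (solve is only reached with i ≤ j)
      (setE H i j 1, 1)
    else
      let r := (List.range (j - i)).foldl
        (fun (s : List (List Int) × Option Int) d =>
          let p := if getE s.1 i (i + d) ≠ 0 then (s.1, getE s.1 i (i + d))
                   else bSolve c fuel i (i + d) s.1
          let q := if getE p.1 (i + d + 1) j ≠ 0 then (p.1, getE p.1 (i + d + 1) j)
                   else bSolve c fuel (i + d + 1) j p.1
          (q.1, some (match s.2 with
            | none => p.2 + q.2
            | some cur => min cur (p.2 + q.2))))
        (H, none)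
      let v := r.2.getD 0 - pvEq c i j
      (setE r.1 i j v, v)

def homoedit_to_empty_alt (x : String) : List (List Int) :=
  let c := x.toList
  let n := c.length
  let H0 := (List.range n).map (fun _ => List.replicate n (0 : Int))
  if 0 < n then (bSolve c n 0 (n - 1) H0).1 else H0

-- ===== PRECONDITION & SPEC =====
def Spec_homoedit_to_empty (x : String) (out : List (List Int)) : Prop := out = homoedit_to_empty_alt x
instance (x : String) (out : List (List Int)) : Decidable (Spec_homoedit_to_empty x out) := by unfold Spec_homoedit_to_empty; infer_instance

-- ===== CLAIM (what is proved, stated in full; the proofs are below) =====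
def Claim_equal_homoedit_to_empty : Prop := ∀ (x : String), Dom_homoedit_to_empty x → Spec_homoedit_to_empty x (homoedit_to_empty x)

-- ===== LEMMAS AND PROOFS =====

-- the homo-edit value of substring x[i..j] (1 on and below the diagonal)
def hs (c : List Char) (i j : Nat) : Int :=
  if _h : j ≤ i then 1
  else pvMin ((List.range (j - i)).attach.map (fun d =>
    hs c i (i + d.1) + hs c (i + d.1 + 1) j)) - pvEq c i j
termination_by j - i
decreasing_by
  · have := List.mem_range.mp d.2; omega
  · have := List.mem_range.mp d.2; omega

-- table entry: 0 strictly below the diagonal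
def M (c : List Char) (i j : Nat) : Int := if j < i then 0 else hs c i j

-- the full table both programs compute
def pvTable (c : List Char) : List (List Int) :=
  (List.range c.length).map (fun a => (List.range c.length).map (fun b => M c a b))

theorem hs_diag (c : List Char) (i j : Nat) (h : j ≤ i) : hs c i j = 1 := by
  rw [hs]; simp [h]

theorem hs_lt (c : List Char) (i j : Nat) (h : i < j) :
    hs c i j = pvMin ((List.range (j - i)).map (fun d =>
      hs c i (i + d) + hs c (i + d + 1) j)) - pvEq c i j := by
  rw [hs]; rw [dif_neg (by omega)]
  have he : ((List.range (j - i)).attach.map (fun d =>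
      hs c i (i + d.1) + hs c (i + d.1 + 1) j)) = (List.range (j - i)).map (fun d =>
      hs c i (i + d) + hs c (i + d + 1) j) := by
    rw [List.map_attach_eq_pmap]
    exact List.pmap_eq_map (f := fun d => hs c i (i + d) + hs c (i + d + 1) j) _
  rw [he]

theorem M_le (c : List Char) (i j : Nat) (h : i ≤ j) : M c i j = hs c i j := by
  unfold M; rw [if_neg (by omega)]

theorem M_diag (c : List Char) (i : Nat) : M c i i = 1 := by
  rw [M_le c i i le_rfl, hs_diag c i i le_rfl]

theorem getD_map_range' {β : Type} (f : Nat → β) (m i : Nat) (d : β) :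
    ((List.range m).map f).getD i d = if i < m then f i else d := by
  split
  · exact PySem.List.getD_map_range f m i d (by assumption)
  · rw [List.getD_eq_getElem?_getD]
    rw [List.getElem?_eq_none (by simpa using by omega)]
    rfl

theorem set_map_range {β : Type} (f : Nat → β) (m i : Nat) (v : β) :
    ((List.range m).map f).set i v = (List.range m).map (fun a => if a = i then v else f a) := by
  apply List.ext_getElem
  · simp
  · intro k h1 h2
    simp only [List.getElem_set, List.getElem_map, List.getElem_range]
    by_cases hk : i = k
    · subst hk; simp
    · rw [if_neg hk, if_neg (fun hc => hk hc.symm)]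

-- read one entry of a table in canonical map-of-range form
theorem tbl_get (n : Nat) (f : Nat → Nat → Int) (a b : Nat) (ha : a < n) (hb : b < n) :
    ((((List.range n).map (fun a => (List.range n).map (fun b => f a b))).getD a []).getD b 0) = f a b := by
  rw [getD_map_range', if_pos ha, getD_map_range', if_pos hb]

-- write one entry of a table in canonical map-of-range form
theorem tbl_set (n : Nat) (f : Nat → Nat → Int) (i j : Nat) (hi : i < n) (v : Int) :
    (((List.range n).map (fun a => (List.range n).map (fun b => f a b))).set i
      ((((List.range n).map (fun a => (List.range n).map (fun b => f a b))).getD i []).set j v))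
    = (List.range n).map (fun a => (List.range n).map (fun b => if a = i ∧ b = j then v else f a b)) := by
  rw [getD_map_range', if_pos hi, set_map_range, set_map_range]
  apply List.map_congr_left
  intro a ha
  by_cases hai : a = i
  · subst hai
    rw [if_pos rfl]
    apply List.map_congr_left
    intro b hb
    by_cases hbj : b = j
    · subst hbj; simp
    · rw [if_neg hbj, if_neg (by tauto)]
  · rw [if_neg hai]
    apply List.map_congr_left
    intro b hb
    rw [if_neg (by tauto)]

theorem tbl_congr (n : Nat) (f g : Nat → Nat → Int)
    (h : ∀ a, a < n → ∀ b, b < n → f a b = g a b) :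
    (List.range n).map (fun a => (List.range n).map (fun b => f a b)) =
      (List.range n).map (fun a => (List.range n).map (fun b => g a b)) := by
  apply List.map_congr_left
  intro a ha
  apply List.map_congr_left
  intro b hb
  exact h a (List.mem_range.mp ha) b (List.mem_range.mp hb)

-- min distributes over subtracting a constant
theorem pvMin_sub (l : List Int) (e : Int) (h : l ≠ []) :
    pvMin (l.map (fun z => z - e)) = pvMin l - e := by
  match l with
  | [] => exact absurd rfl h
  | a :: t =>
    simp only [List.map_cons, pvMin, PySem.List.min?_id_cons, Option.getD_some]
    induction t generalizing a with
    | nil => simp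
    | cons b t ih =>
      simp only [List.map_cons, List.foldl_cons]
      have hmin : min (a - e) (b - e) = min a b - e := by
        rcases le_total a b with h' | h'
        · rw [min_eq_left h', min_eq_left (by omega)]
        · rw [min_eq_right h', min_eq_right (by omega)]
      rw [hmin, ih (min a b) (by simp)]

theorem pvMin_append_singleton (l : List Int) (z : Int) (h : l ≠ []) :
    pvMin (l ++ [z]) = min (pvMin l) z := by
  match l with
  | [] => exact absurd rfl h
  | a :: t =>
    simp only [List.cons_append, pvMin, PySem.List.min?_id_cons, Option.getD_some,
      List.foldl_append, List.foldl_cons, List.foldl_nil]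

-- ===== B side =====

-- lower bound for pvMin
theorem pvMin_ge (l : List Int) (m : Int) (h : l ≠ []) (hall : ∀ z ∈ l, m ≤ z) :
    m ≤ pvMin l := by
  match l with
  | [] => exact absurd rfl h
  | a :: t =>
    simp only [pvMin, PySem.List.min?_id_cons, Option.getD_some]
    induction t generalizing a with
    | nil => exact hall a (by simp)
    | cons b t ih =>
      simp only [List.foldl_cons]
      refine ih (min a b) ?_ ?_
      · simp
      · intro z hz
        rcases List.mem_cons.mp hz with hz | hz
        · subst hz
          rcases le_total a b with h' | h'
          · rw [min_eq_left h']; exact hall a (by simp)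
          · rw [min_eq_right h']; exact hall b (by simp)
        · exact hall z (by simp [hz])

-- every homo-edit value is at least 1 (so 0 marks an uncomputed cell)
theorem hs_pos (c : List Char) : ∀ (span i j : Nat), j - i = span → 1 ≤ hs c i j := by
  intro span
  induction span using Nat.strong_induction_on with
  | _ span ih =>
  intro i j hspan
  by_cases hij : j ≤ i
  · rw [hs_diag c i j hij]
  · rw [hs_lt c i j (by omega)]
    have h2 : (2 : Int) ≤ pvMin ((List.range (j - i)).map (fun d =>
        hs c i (i + d) + hs c (i + d + 1) j)) := by
      refine pvMin_ge _ _ (by simp only [ne_eq, List.map_eq_nil_iff, List.range_eq_nil]; omega) ?_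
      intro z hz
      obtain ⟨d, hd, hz⟩ := List.mem_map.mp hz
      have hd' : d < j - i := List.mem_range.mp hd
      have g1 := ih d (by omega) i (i + d) (by omega)
      have g2 := ih (j - (i + d + 1)) (by omega) (i + d + 1) j (by omega)
      omega
    have he : pvEq c i j ≤ 1 := by unfold pvEq; split <;> omega
    omega

-- table invariant: every nonzero cell is a correct upper-triangle value, and a nonzero
-- cell (a, b) implies every subinterval cell of [a, b] is nonzero too
def tInv (c : List Char) (H : List (List Int)) : Prop :=
  H.length = c.length ∧ (∀ k, k < H.length → (H.getD k []).length = c.length) ∧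
  ∀ a b, getE H a b ≠ 0 → a ≤ b ∧ getE H a b = hs c a b ∧
    ∀ a' b', a ≤ a' → a' ≤ b' → b' ≤ b → getE H a' b' ≠ 0

theorem getD_set_self' {α : Type} (l : List α) (i : Nat) (a d : α) (h : i < l.length) :
    (l.set i a).getD i d = a := by
  rw [List.getD_eq_getElem?_getD, List.getElem?_set_self (by simpa using h)]
  rfl

theorem getD_set_ne {α : Type} (l : List α) (i k : Nat) (a d : α) (h : i ≠ k) :
    (l.set i a).getD k d = l.getD k d := by
  rw [List.getD_eq_getElem?_getD, List.getElem?_set_ne h, ← List.getD_eq_getElem?_getD]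

theorem getE_setE (H : List (List Int)) (i j : Nat) (v : Int)
    (hi : i < H.length) (hj : j < (H.getD i []).length) (a b : Nat) :
    getE (setE H i j v) a b = if a = i ∧ b = j then v else getE H a b := by
  unfold getE setE
  by_cases hai : a = i
  · subst hai
    rw [getD_set_self' _ _ _ _ hi]
    by_cases hbj : b = j
    · subst hbj
      rw [getD_set_self' _ _ _ _ hj, if_pos ⟨rfl, rfl⟩]
    · rw [getD_set_ne _ _ _ _ _ (fun hc => hbj hc.symm), if_neg (by tauto)]
  · rw [getD_set_ne _ _ _ _ _ (fun hc => hai hc.symm), if_neg (by tauto)]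

theorem length_setE (H : List (List Int)) (i j : Nat) (v : Int) :
    (setE H i j v).length = H.length := by
  unfold setE; rw [List.length_set]

theorem getD_row_setE (H : List (List Int)) (i j : Nat) (v : Int) (k : Nat) (hk : k ≠ i) :
    (setE H i j v).getD k [] = H.getD k [] := by
  unfold setE
  rw [getD_set_ne _ _ _ _ _ (fun hc => hk hc.symm)]

theorem getD_row_setE_self (H : List (List Int)) (i j : Nat) (v : Int) (hi : i < H.length) :
    (setE H i j v).getD i [] = (H.getD i []).set j v := by
  unfold setE
  rw [getD_set_self' _ _ _ _ hi]

-- proof-side name for the body of bSolve's fold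
def bStep (c : List Char) (fuel : Nat) (i j : Nat) (s : List (List Int) × Option Int) (d : Nat) :
    List (List Int) × Option Int :=
  let p := if getE s.1 i (i + d) ≠ 0 then (s.1, getE s.1 i (i + d))
           else bSolve c fuel i (i + d) s.1
  let q := if getE p.1 (i + d + 1) j ≠ 0 then (p.1, getE p.1 (i + d + 1) j)
           else bSolve c fuel (i + d + 1) j p.1
  (q.1, some (match s.2 with
    | none => p.2 + q.2
    | some cur => min cur (p.2 + q.2)))

theorem bSolve_of_lt (c : List Char) (fuel i j : Nat) (H : List (List Int)) (hij : i < j) :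
    bSolve c (fuel + 1) i j H =
      (setE (((List.range (j - i)).foldl (bStep c fuel i j) (H, none)).1) i j
          ((((List.range (j - i)).foldl (bStep c fuel i j) (H, none)).2).getD 0 - pvEq c i j),
        (((List.range (j - i)).foldl (bStep c fuel i j) (H, none)).2).getD 0 - pvEq c i j) := by
  conv_lhs => rw [bSolve]
  rw [if_neg (by omega)]
  rfl

-- cmap t: the first t candidate sums of Python's running minimum
def cmap (c : List Char) (i j t : Nat) : List Int :=
  (List.range t).map (fun d => hs c i (i + d) + hs c (i + d + 1) j)

theorem bSolve_spec (c : List Char) : ∀ (fuel i j : Nat) (H : List (List Int)),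
    j - i < fuel → i ≤ j → j < c.length → tInv c H →
    tInv c (bSolve c fuel i j H).1 ∧
    (∀ a b, getE H a b ≠ 0 → getE (bSolve c fuel i j H).1 a b ≠ 0) ∧
    getE (bSolve c fuel i j H).1 i j ≠ 0 ∧
    (bSolve c fuel i j H).2 = hs c i j := by
  intro fuel
  induction fuel with
  | zero => intro i j H hspan; omega
  | succ fuel ih =>
  intro i j H hspan hij hjn hInv
  obtain ⟨hlen, hrows, hval⟩ := hInv
  by_cases heq : i = j
  · -- base case i == j
    have hbs : bSolve c (fuel + 1) i j H = (setE H i j 1, 1) := by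
      conv_lhs => rw [bSolve]
      rw [if_pos (by omega : j ≤ i)]
    have hi : i < H.length := by omega
    have hj : j < (H.getD i []).length := by rw [hrows i hi]; omega
    have hget : ∀ a b, getE (setE H i j 1) a b = if a = i ∧ b = j then 1 else getE H a b :=
      getE_setE H i j 1 hi hj
    refine ⟨⟨?_, ?_, ?_⟩, ?_, ?_, ?_⟩
    · rw [hbs, length_setE]; exact hlen
    · rw [hbs, length_setE]
      intro k hk
      by_cases hki : k = i
      · subst hki
        rw [getD_row_setE_self H k j 1 hi, List.length_set]
        exact hrows k hk
      · rw [getD_row_setE H i j 1 k hki]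
        exact hrows k hk
    · rw [hbs]
      intro a b hab
      rw [hget a b] at hab ⊢
      split at hab
      · rename_i hcase
        rw [if_pos hcase]
        refine ⟨by omega, ?_, ?_⟩
        · rw [hcase.1, hcase.2]
          exact (hs_diag c i j (by omega)).symm
        · intro a' b' h1 h2 h3
          rw [hget a' b', if_pos (by omega : a' = i ∧ b' = j)]
          omega
      · rename_i hcase
        rw [if_neg hcase]
        obtain ⟨h1, h2, h3⟩ := hval a b hab
        refine ⟨h1, h2, ?_⟩
        intro a' b' ha' hb' hc'
        rw [hget a' b']
        split
        · omega
        · exact h3 a' b' ha' hb' hc'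
    · rw [hbs]
      intro a b hab
      rw [hget a b]
      split
      · omega
      · exact hab
    · rw [hbs]
      show getE (setE H i j 1) i j ≠ 0
      rw [hget i j, if_pos ⟨rfl, rfl⟩]
      omega
    · rw [hbs]
      exact (hs_diag c i j (by omega)).symm
  · have hlt : i < j := by omega
    -- fold invariant
    have hfold : ∀ t, t ≤ j - i →
        tInv c ((List.range t).foldl (bStep c fuel i j) (H, none)).1 ∧
        (∀ a b, getE H a b ≠ 0 →
          getE (((List.range t).foldl (bStep c fuel i j) (H, none)).1) a b ≠ 0) ∧
        (∀ d, d < t →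
          getE (((List.range t).foldl (bStep c fuel i j) (H, none)).1) i (i + d) ≠ 0 ∧
          getE (((List.range t).foldl (bStep c fuel i j) (H, none)).1) (i + d + 1) j ≠ 0) ∧
        ((List.range t).foldl (bStep c fuel i j) (H, none)).2 =
          (if t = 0 then none else some (pvMin (cmap c i j t))) := by
      intro t
      induction t with
      | zero =>
        intro _
        exact ⟨⟨hlen, hrows, hval⟩, fun a b h => h, fun d hd => absurd hd (by omega), rfl⟩
      | succ t iht =>
        intro ht
        obtain ⟨hI, hE, hC, hA⟩ := iht (by omega)
        set R := (List.range t).foldl (bStep c fuel i j) (H, none) with hR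
        have hstep : (List.range (t + 1)).foldl (bStep c fuel i j) (H, none) = bStep c fuel i j R t := by
          rw [List.range_succ, List.foldl_append, List.foldl_cons, List.foldl_nil, hR]
        -- the p half: a = H[i][i+t] or solve(i, i+t)
        have hp : tInv c (if getE R.1 i (i + t) ≠ 0 then (R.1, getE R.1 i (i + t))
              else bSolve c fuel i (i + t) R.1).1 ∧
            (∀ a b, getE R.1 a b ≠ 0 → getE (if getE R.1 i (i + t) ≠ 0 then (R.1, getE R.1 i (i + t))
              else bSolve c fuel i (i + t) R.1).1 a b ≠ 0) ∧
            getE (if getE R.1 i (i + t) ≠ 0 then (R.1, getE R.1 i (i + t))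
              else bSolve c fuel i (i + t) R.1).1 i (i + t) ≠ 0 ∧
            (if getE R.1 i (i + t) ≠ 0 then (R.1, getE R.1 i (i + t))
              else bSolve c fuel i (i + t) R.1).2 = hs c i (i + t) := by
          split
          · rename_i hnz
            obtain ⟨_, h2, _⟩ := hI.2.2 i (i + t) hnz
            exact ⟨hI, fun a b h => h, hnz, h2⟩
          · exact ih i (i + t) R.1 (by omega) (by omega) (by omega) hI
        set P := (if getE R.1 i (i + t) ≠ 0 then (R.1, getE R.1 i (i + t))
          else bSolve c fuel i (i + t) R.1) with hP
        obtain ⟨hpI, hpE, hpK, hpV⟩ := hp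
        -- the q half: b = H[i+t+1][j] or solve(i+t+1, j)
        have hq : tInv c (if getE P.1 (i + t + 1) j ≠ 0 then (P.1, getE P.1 (i + t + 1) j)
              else bSolve c fuel (i + t + 1) j P.1).1 ∧
            (∀ a b, getE P.1 a b ≠ 0 → getE (if getE P.1 (i + t + 1) j ≠ 0 then (P.1, getE P.1 (i + t + 1) j)
              else bSolve c fuel (i + t + 1) j P.1).1 a b ≠ 0) ∧
            getE (if getE P.1 (i + t + 1) j ≠ 0 then (P.1, getE P.1 (i + t + 1) j)
              else bSolve c fuel (i + t + 1) j P.1).1 (i + t + 1) j ≠ 0 ∧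
            (if getE P.1 (i + t + 1) j ≠ 0 then (P.1, getE P.1 (i + t + 1) j)
              else bSolve c fuel (i + t + 1) j P.1).2 = hs c (i + t + 1) j := by
          split
          · rename_i hnz
            obtain ⟨_, h2, _⟩ := hpI.2.2 (i + t + 1) j hnz
            exact ⟨hpI, fun a b h => h, hnz, h2⟩
          · exact ih (i + t + 1) j P.1 (by omega) (by omega) hjn hpI
        set Q := (if getE P.1 (i + t + 1) j ≠ 0 then (P.1, getE P.1 (i + t + 1) j)
          else bSolve c fuel (i + t + 1) j P.1) with hQ
        obtain ⟨hqI, hqE, hqK, hqV⟩ := hq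
        have hstep2 : bStep c fuel i j R t = (Q.1, some (match R.2 with
            | none => P.2 + Q.2
            | some cur => min cur (P.2 + Q.2))) := by
          rw [bStep, ← hP, ← hQ]
        rw [hstep, hstep2]
        refine ⟨hqI, ?_, ?_, ?_⟩
        · intro a b h
          exact hqE a b (hpE a b (hE a b h))
        · intro d hd
          by_cases hdt : d < t
          · obtain ⟨h1, h2⟩ := hC d hdt
            exact ⟨hqE _ _ (hpE _ _ h1), hqE _ _ (hpE _ _ h2)⟩
          · have hdt' : d = t := by omega
            subst hdt'
            exact ⟨hqE _ _ hpK, hqK⟩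
        · show (some (match R.2 with
            | none => P.2 + Q.2
            | some cur => min cur (P.2 + Q.2))) = _
          rw [hA, hpV, hqV]
          by_cases ht0 : t = 0
          · subst ht0
            simp only [if_neg (Nat.one_ne_zero), reduceIte]
            have hone : cmap c i j 1 = [hs c i (i + 0) + hs c (i + 0 + 1) j] := rfl
            rw [hone]
            simp [pvMin, PySem.List.min?_id_cons]
          · rw [if_neg ht0, if_neg (by omega)]
            have hcm : cmap c i j (t + 1) = cmap c i j t ++ [hs c i (i + t) + hs c (i + t + 1) j] := by
              unfold cmap
              rw [List.range_succ, List.map_append]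
              rfl
            rw [hcm, pvMin_append_singleton _ _ (by
              unfold cmap
              simp only [ne_eq, List.map_eq_nil_iff, List.range_eq_nil]
              omega)]
    obtain ⟨hI, hE, hC, hA⟩ := hfold (j - i) le_rfl
    set R := (List.range (j - i)).foldl (bStep c fuel i j) (H, none) with hR
    have hbs := bSolve_of_lt c fuel i j H hlt
    have hv : R.2.getD 0 - pvEq c i j = hs c i j := by
      rw [hA, if_neg (by omega)]
      rw [hs_lt c i j hlt]
      rfl
    have hvnz : R.2.getD 0 - pvEq c i j ≠ 0 := by
      rw [hv]
      have := hs_pos c (j - i) i j rfl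
      omega
    obtain ⟨hIlen, hIrows, hIval⟩ := hI
    have hi' : i < R.1.length := by omega
    have hj' : j < (R.1.getD i []).length := by rw [hIrows i hi']; omega
    have hget : ∀ a b, getE (setE R.1 i j (R.2.getD 0 - pvEq c i j)) a b =
        if a = i ∧ b = j then R.2.getD 0 - pvEq c i j else getE R.1 a b :=
      getE_setE R.1 i j _ hi' hj'
    -- every proper subpair of [i, j] is nonzero in R.1
    have hcov : ∀ a b, i ≤ a → a ≤ b → b ≤ j → (a, b) ≠ (i, j) → getE R.1 a b ≠ 0 := by
      intro a b ha hab hb hne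
      by_cases hbj : b < j
      · obtain ⟨h1, _⟩ := hC (j - i - 1) (by omega)
        obtain ⟨_, _, hclo⟩ := hIval i (i + (j - i - 1)) h1
        exact hclo a b (by omega) hab (by omega)
      · have hbj' : b = j := by omega
        have hia : i < a := by
          rcases Nat.lt_or_ge i a with h' | h'
          · exact h'
          · have hai : a = i := by omega
            exact absurd (by rw [hai, hbj'] : (a, b) = (i, j)) hne
        obtain ⟨_, h2⟩ := hC (a - i - 1) (by omega)
        have hx : i + (a - i - 1) + 1 = a := by omega
        rw [hx] at h2
        rw [hbj']
        exact h2
    refine ⟨⟨?_, ?_, ?_⟩, ?_, ?_, ?_⟩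
    · rw [hbs, length_setE]; exact hIlen
    · rw [hbs, length_setE]
      intro k hk
      by_cases hki : k = i
      · subst hki
        rw [getD_row_setE_self R.1 k j _ hi', List.length_set]
        exact hIrows k hk
      · rw [getD_row_setE R.1 i j _ k hki]
        exact hIrows k hk
    · rw [hbs]
      intro a b hab
      rw [hget a b] at hab ⊢
      split at hab
      · rename_i hcase
        rw [if_pos hcase]
        refine ⟨by omega, ?_, ?_⟩
        · rw [hcase.1, hcase.2]
          exact hv
        · intro a' b' h1 h2 h3
          rw [hget a' b']
          split
          · exact hvnz
          · rename_i hne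
            exact hcov a' b' (by omega) h2 (by omega) (by simpa [Prod.mk.injEq] using hne)
      · rename_i hcase
        rw [if_neg hcase]
        obtain ⟨h1, h2, h3⟩ := hIval a b hab
        refine ⟨h1, h2, ?_⟩
        intro a' b' ha' hb' hc'
        rw [hget a' b']
        split
        · exact hvnz
        · exact h3 a' b' ha' hb' hc'
    · rw [hbs]
      intro a b hab
      rw [hget a b]
      split
      · exact hvnz
      · exact hE a b hab
    · rw [hbs]
      show getE (setE R.1 i j (R.2.getD 0 - pvEq c i j)) i j ≠ 0
      rw [hget i j, if_pos ⟨rfl, rfl⟩]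
      exact hvnz
    · rw [hbs]
      exact hv

theorem getE_H0 (n : Nat) (a b : Nat) :
    getE ((List.range n).map (fun _ => List.replicate n (0 : Int))) a b = 0 := by
  unfold getE
  rw [getD_map_range']
  split
  · rw [List.getD_eq_getElem?_getD, List.getElem?_replicate]
    split <;> rfl
  · rfl

theorem tInv_H0 (c : List Char) :
    tInv c ((List.range c.length).map (fun _ => List.replicate c.length (0 : Int))) := by
  refine ⟨by simp, ?_, ?_⟩
  · intro k hk
    simp only [List.length_map, List.length_range] at hk
    rw [getD_map_range', if_pos hk, List.length_replicate]
  · intro a b hab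
    exact absurd (getE_H0 c.length a b) hab

theorem alt_eq (x : String) : homoedit_to_empty_alt x = pvTable x.toList := by
  by_cases h0 : x.toList.length = 0
  · simp only [homoedit_to_empty_alt, pvTable, h0, List.range_zero, List.map_nil,
      if_neg (by omega : ¬ (0 : Nat) < 0)]
  · have hpos : 0 < x.toList.length := by omega
    obtain ⟨hInv, _, hkey, _⟩ := bSolve_spec x.toList x.toList.length 0
      (x.toList.length - 1)
      ((List.range x.toList.length).map (fun _ => List.replicate x.toList.length (0 : Int)))
      (by omega) (by omega) (by omega) (tInv_H0 x.toList)
    obtain ⟨hlen, hrowsI, hval⟩ := hInv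
    obtain ⟨_, _, hclo⟩ := hval 0 (x.toList.length - 1) hkey
    set F := (bSolve x.toList x.toList.length 0 (x.toList.length - 1)
      ((List.range x.toList.length).map (fun _ => List.replicate x.toList.length (0 : Int)))).1 with hF
    have hentry : ∀ a b, a < x.toList.length → b < x.toList.length →
        getE F a b = M x.toList a b := by
      intro a b ha hb
      by_cases hab : a ≤ b
      · have hnz := hclo a b (by omega) hab (by omega)
        obtain ⟨_, h2, _⟩ := hval a b hnz
        rw [h2, M_le x.toList a b hab]
      · by_cases hz : getE F a b = 0
        · rw [hz]
          unfold M
          rw [if_pos (by omega)]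
        · obtain ⟨h1, _, _⟩ := hval a b hz
          omega
    simp only [homoedit_to_empty_alt, pvTable, if_pos hpos, ← hF]
    apply List.ext_getElem
    · rw [hlen, List.length_map, List.length_range]
    · intro a ha1 ha2
      have ha : a < x.toList.length := by
        simpa using ha2
      have hrowa : (F.getD a []).length = x.toList.length := hrowsI a (by omega)
      have hFa : F[a] = F.getD a [] := by
        rw [List.getD_eq_getElem?_getD, List.getElem?_eq_getElem ha1, Option.getD_some]
      apply List.ext_getElem
      · rw [hFa, hrowa]
        simp
      · intro b hb1 hb2
        have hb : b < x.toList.length := by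
          simpa using hb2
        have hFb : F[a][b] = getE F a b := by
          unfold getE
          rw [← hFa]
          rw [List.getD_eq_getElem?_getD, List.getElem?_eq_getElem hb1, Option.getD_some]
        rw [hFb, hentry a b ha hb]
        simp [List.getElem_map, List.getElem_range]

-- ===== A side =====

theorem aStep (c : List Char) (j m : Nat) (f : Nat → Nat → Int)
    (hj2 : 2 ≤ j) (hm : m + j ≤ c.length)
    (hread1 : ∀ d, d < j - 1 → f m (m + d) = M c m (m + d))
    (hread2 : ∀ d, d < j - 1 → f (m + d + 1) (m + j - 1) = M c (m + d + 1) (m + j - 1)) :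
    aInnerStep c j ((List.range c.length).map (fun a => (List.range c.length).map (fun b => f a b))) m =
      (List.range c.length).map (fun a => (List.range c.length).map (fun b =>
        if a = m ∧ b = m + j - 1 then M c m (m + j - 1) else f a b)) := by
  unfold aInnerStep
  have hC : pvMin ((List.range (j - 1)).map (fun d =>
      (((List.range c.length).map (fun a => (List.range c.length).map (fun b => f a b))).getD m []).getD (m + d) 0 +
      (((List.range c.length).map (fun a => (List.range c.length).map (fun b => f a b))).getD (m + d + 1) []).getD (m + j - 1) 0 -
      pvEq c m (m + j - 1))) = M c m (m + j - 1) := by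
    have h1 : (List.range (j - 1)).map (fun d =>
        (((List.range c.length).map (fun a => (List.range c.length).map (fun b => f a b))).getD m []).getD (m + d) 0 +
        (((List.range c.length).map (fun a => (List.range c.length).map (fun b => f a b))).getD (m + d + 1) []).getD (m + j - 1) 0 -
        pvEq c m (m + j - 1)) =
        ((List.range (j - 1)).map (fun d => hs c m (m + d) + hs c (m + d + 1) (m + j - 1))).map
          (fun z => z - pvEq c m (m + j - 1)) := by
      rw [List.map_map]
      apply List.map_congr_left
      intro d hd
      have hd' : d < j - 1 := List.mem_range.mp hd
      show _ = hs c m (m + d) + hs c (m + d + 1) (m + j - 1) - pvEq c m (m + j - 1)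
      rw [tbl_get c.length f m (m + d) (by omega) (by omega)]
      rw [tbl_get c.length f (m + d + 1) (m + j - 1) (by omega) (by omega)]
      rw [hread1 d hd', hread2 d hd']
      rw [M_le c m (m + d) (by omega), M_le c (m + d + 1) (m + j - 1) (by omega)]
    rw [h1, pvMin_sub _ _ (by
      simp only [ne_eq, List.map_eq_nil_iff, List.range_eq_nil]
      omega)]
    rw [M_le c m (m + j - 1) (by omega), hs_lt c m (m + j - 1) (by omega)]
    have hr : m + j - 1 - m = j - 1 := by omega
    rw [hr]
  rw [hC]
  exact tbl_set c.length f m (m + j - 1) (by omega) (M c m (m + j - 1))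

theorem diag_inv (c : List Char) : ∀ m, m ≤ c.length →
    (List.range m).foldl (fun H i => H.set i ((H.getD i []).set i (1 : Int)))
      ((List.range c.length).map (fun _ => (List.range c.length).map (fun _ => (0 : Int)))) =
    (List.range c.length).map (fun a => (List.range c.length).map (fun b => if a = b ∧ a < m then (1 : Int) else 0)) := by
  intro m
  induction m with
  | zero =>
    intro _
    exact tbl_congr c.length (fun _ _ => (0 : Int)) (fun a b => if a = b ∧ a < 0 then (1 : Int) else 0)
      (by intro a _ b _; beta_reduce; rw [if_neg (by omega)])
  | succ m ih =>
    intro hm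
    rw [List.range_succ, List.foldl_append, ih (by omega)]
    simp only [List.foldl_cons, List.foldl_nil]
    rw [tbl_set c.length (fun a b => if a = b ∧ a < m then (1 : Int) else 0) m m (by omega) 1]
    exact tbl_congr c.length
      (fun a b => if a = m ∧ b = m then (1 : Int) else if a = b ∧ a < m then (1 : Int) else 0)
      (fun a b => if a = b ∧ a < m + 1 then (1 : Int) else 0)
      (by intro a ha b hb; beta_reduce; split_ifs <;> first | rfl | omega)

theorem aInner_inv (c : List Char) (j : Nat) (hj2 : 2 ≤ j) (hjn : j ≤ c.length) :
    ∀ m, m ≤ c.length - j + 1 →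
    (List.range m).foldl (aInnerStep c j)
      ((List.range c.length).map (fun a => (List.range c.length).map (fun b => if b < a + (j - 1) then M c a b else 0))) =
    (List.range c.length).map (fun a => (List.range c.length).map (fun b =>
      if b < a + (j - 1) ∨ (a < m ∧ b = a + (j - 1)) then M c a b else 0)) := by
  intro m
  induction m with
  | zero =>
    intro _
    exact tbl_congr c.length (fun a b => if b < a + (j - 1) then M c a b else 0)
      (fun a b => if b < a + (j - 1) ∨ (a < 0 ∧ b = a + (j - 1)) then M c a b else 0)
      (by intro a _ b _; beta_reduce; split_ifs <;> first | rfl | omega)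
  | succ m ih =>
    intro hm
    rw [List.range_succ, List.foldl_append, ih (by omega)]
    simp only [List.foldl_cons, List.foldl_nil]
    rw [aStep c j m (fun a b => if b < a + (j - 1) ∨ (a < m ∧ b = a + (j - 1)) then M c a b else 0)
      hj2 (by omega)
      (by intro d hd; beta_reduce; rw [if_pos (Or.inl (by omega))])
      (by intro d hd; beta_reduce; rw [if_pos (Or.inl (by omega))])]
    exact tbl_congr c.length
      (fun a b => if a = m ∧ b = m + j - 1 then M c m (m + j - 1)
        else if b < a + (j - 1) ∨ (a < m ∧ b = a + (j - 1)) then M c a b else 0)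
      (fun a b => if b < a + (j - 1) ∨ (a < m + 1 ∧ b = a + (j - 1)) then M c a b else 0)
      (by
        intro a ha b hb
        beta_reduce
        by_cases h1 : a = m ∧ b = m + j - 1
        · rw [if_pos h1, if_pos (Or.inr ⟨by omega, by omega⟩), h1.1, h1.2]
        · rw [if_neg h1]
          split_ifs <;> first | rfl | omega)

theorem aOuter (c : List Char) : ∀ u, u ≤ c.length - 1 →
    (List.range u).foldl (fun H t => (List.range (c.length - (t + 2) + 1)).foldl (aInnerStep c (t + 2)) H)
      ((List.range c.length).map (fun a => (List.range c.length).map (fun b => if b < a + 1 then M c a b else 0))) =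
    (List.range c.length).map (fun a => (List.range c.length).map (fun b => if b < a + (u + 1) then M c a b else 0)) := by
  intro u
  induction u with
  | zero => intro _; rfl
  | succ u ih =>
    intro hu
    rw [List.range_succ, List.foldl_append, ih (by omega)]
    simp only [List.foldl_cons, List.foldl_nil]
    have hinner := aInner_inv c (u + 2) (by omega) (by omega) (c.length - (u + 2) + 1) le_rfl
    have hsub : u + 2 - 1 = u + 1 := by omega
    rw [hsub] at hinner
    rw [hinner]
    exact tbl_congr c.length
      (fun a b => if b < a + (u + 1) ∨ (a < c.length - (u + 2) + 1 ∧ b = a + (u + 1)) then M c a b else 0)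
      (fun a b => if b < a + (u + 1 + 1) then M c a b else 0)
      (by intro a ha b hb; beta_reduce; split_ifs <;> first | rfl | omega)

theorem a_eq (x : String) : homoedit_to_empty x = pvTable x.toList := by
  simp only [homoedit_to_empty, pvTable]
  rw [diag_inv x.toList x.toList.length le_rfl]
  have h1 : (List.range x.toList.length).map (fun a => (List.range x.toList.length).map (fun b => if a = b ∧ a < x.toList.length then (1 : Int) else 0)) =
      (List.range x.toList.length).map (fun a => (List.range x.toList.length).map (fun b => if b < a + 1 then M x.toList a b else 0)) :=
    tbl_congr _ _ _ (by
      intro a ha b hb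
      by_cases hab : a = b
      · subst hab
        rw [if_pos ⟨rfl, ha⟩, if_pos (by omega), M_diag]
      · rw [if_neg (by tauto)]
        by_cases hba : b < a + 1
        · rw [if_pos hba]
          unfold M
          rw [if_pos (by omega)]
        · rw [if_neg hba])
  rw [h1]
  rw [aOuter x.toList (x.toList.length - 1) le_rfl]
  exact tbl_congr _ _ _ (by
    intro a ha b hb
    rw [if_pos (by omega)])

-- ===== VERDICT (by name: the statement is the Claim_ definition above) =====
theorem homoedit_to_empty_spec : Claim_equal_homoedit_to_empty := by
  intro x _
  unfold Spec_homoedit_to_empty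
  rw [a_eq, alt_eq]
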